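-- pv_equiv track=rewrite | github.com/jingwangian/tutorial | python/hanker/TwoCharacters.py | get_max_tstring_len
-- ===== SOURCE A (Python) =====
-- from itertools import combinations
-- from itertools import groupby
--
-- def valid_list(s_list):
--     l1 = [list(g) for k, g in groupby(s_list)]
--     if len(max(l1, key=lambda x: len(x))) > 1:
--         return False
--     else:
--         return True
--
-- def get_max_tstring_len(s):
--     set_s = set(s)
--
--     if len(set_s) < 2:
--         return 0
--     elif len(set_s) == 2:
--         if valid_list(list(s)):
--             return len(list(s))
--         else:
--             return 0
--     else:
--         comb_list = list(combinations(set_s, len(set_s) - 2))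
--         max_num = 0
--         for comb in comb_list:
--             fin_list = list(filter(lambda x: x not in comb, s))
--             if valid_list(fin_list):
--                 if len(fin_list) > max_num:
--                     max_num = len(fin_list)
--
--         return max_num
-- ===== SOURCE B (Python) =====
-- def get_max_tstring_len(s):
--     chars = sorted(set(s))
--     # one finite-state record per unordered pair of distinct characters:
--     # [a, b, last_kept_char, kept_count, still_alternating]
--     state = [[a, b, None, 0, True] for i, a in enumerate(chars) for b in chars[i + 1:]]
--     for c in s:
--         for rec in state:
--             if c == rec[0] or c == rec[1]:
--                 if rec[2] == c:
--                     rec[4] = False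
--                 else:
--                     rec[2] = c
--                     rec[3] += 1
--     best = 0
--     for rec in state:
--         if rec[4] and rec[3] > best:
--             best = rec[3]
--     return best
-- ===== Notes on version B (the rewrite author's own statement) =====
-- stated objective: alternative
-- what changed: B replaces A's generate-and-test (enumerate (k-2)-subsets, filter the string per subset, groupby run-length validity check) by a single left-to-right sweep over s that drives one per-pair finite-state machine (last kept char, kept count, still-alternating flag) for every pair of distinct characters simultaneously, then takes the best surviving count.
import Mathlib
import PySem

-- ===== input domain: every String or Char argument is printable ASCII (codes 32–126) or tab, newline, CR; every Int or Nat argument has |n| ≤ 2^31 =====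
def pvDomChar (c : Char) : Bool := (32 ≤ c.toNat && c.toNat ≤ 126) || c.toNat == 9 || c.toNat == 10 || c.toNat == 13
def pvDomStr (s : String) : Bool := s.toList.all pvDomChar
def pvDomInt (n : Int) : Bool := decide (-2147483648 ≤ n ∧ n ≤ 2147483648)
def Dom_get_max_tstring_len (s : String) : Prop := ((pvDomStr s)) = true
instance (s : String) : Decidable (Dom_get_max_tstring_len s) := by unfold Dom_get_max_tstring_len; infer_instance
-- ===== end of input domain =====

-- B replaces A's generate-and-test ((k-2)-subset enumeration, per-subset filtering, groupby
-- validity check) by a single sweep over s driving one finite-state machine per character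
-- pair (last kept char, kept count, still-alternating flag) simultaneously (objective: alternative).

-- ===== PORT A =====
-- groupby(s_list) as the list of maximal runs of equal elements (itertools.groupby groups)
def pvRunsA (l : List Char) : List (List Char) :=
  match l with
  | [] => []
  | x :: xs => (x :: xs.takeWhile (fun y => y == x)) :: pvRunsA (xs.dropWhile (fun y => y == x))
termination_by l.length
decreasing_by
  have := (List.dropWhile_sublist (p := fun y => y == x) (l := xs)).length_le
  simp; omega

-- valid_list: max(l1, key=len) is PySem.List.maxD (default [] is unreachable: A never calls it on [])
def valid_list (s_list : List Char) : Bool :=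
  let l1 := pvRunsA s_list
  if (PySem.List.maxD l1 (fun x => x.length) []).length > 1 then false else true

def get_max_tstring_len (s : String) : Int :=
  let set_s : PySem.Set Char := PySem.Set.ofList s.toList
  if set_s.length < 2 then 0
  else if set_s.length == 2 then
    if valid_list s.toList then (s.toList.length : Int) else 0
  else
    let comb_list := PySem.List.combinations set_s (set_s.length - 2)
    comb_list.foldl (fun max_num comb =>
      let fin_list := s.toList.filter (fun x => !(comb.contains x))
      if valid_list fin_list then
        if (fin_list.length : Int) > max_num then (fin_list.length : Int) else max_num
      else max_num) 0

-- ===== PORT B =====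
-- the body of B's inner 'for rec in state' loop, acting on one record's (last, count, ok) part
def pvUpd (a b : Char) (c : Char) (q : Option Char × Int × Bool) : Option Char × Int × Bool :=
  if c == a || c == b then
    if q.1 == some c then (q.1, q.2.1, false)
    else (some c, q.2.1 + 1, q.2.2)
  else q

def pvStep1 (r : Char × Char × Option Char × Int × Bool) (c : Char) :
    Char × Char × Option Char × Int × Bool :=
  (r.1, r.2.1, pvUpd r.1 r.2.1 c r.2.2)

-- state = [[a, b, None, 0, True] for i, a in enumerate(chars) for b in chars[i+1:]]
def pvInitState (chars : List Char) : List (Char × Char × Option Char × Int × Bool) :=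
  (PySem.List.enumerate chars).flatMap (fun ia =>
    (PySem.List.slice chars (some (ia.1 + 1)) none).map (fun b => (ia.2, b, none, 0, true)))

def get_max_tstring_len_alt (s : String) : Int :=
  let chars := PySem.List.sorted (PySem.Set.ofList s.toList) (fun x => x) false
  let state := s.toList.foldl (fun st c => st.map (fun r => pvStep1 r c)) (pvInitState chars)
  state.foldl (fun best r =>
    if r.2.2.2.2 = true ∧ r.2.2.2.1 > best then r.2.2.2.1 else best) 0

-- ===== PRECONDITION & SPEC =====
def Spec_get_max_tstring_len (s : String) (out : Int) : Prop := out = get_max_tstring_len_alt s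
instance (s : String) (out : Int) : Decidable (Spec_get_max_tstring_len s out) := by unfold Spec_get_max_tstring_len; infer_instance

-- ===== CLAIM (what is proved, stated in full; the proofs are below) =====
def Claim_equal_get_max_tstring_len : Prop := ∀ (s : String), Dom_get_max_tstring_len s → Spec_get_max_tstring_len s (get_max_tstring_len s)

-- ===== LEMMAS AND PROOFS =====

-- B's alternation property, named for the proofs
def pvAlt (t : List Char) : Bool := (t.zip t.tail).all (fun q => q.1 != q.2)

-- the per-candidate values of A's loop and of B's records
def pvGA (cs : List Char) (comb : List Char) : Int :=
  if valid_list (cs.filter (fun x => !(comb.contains x))) then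
    ((cs.filter (fun x => !(comb.contains x))).length : Int)
  else 0

def pvGB (cs : List Char) (p : List Char) : Int :=
  match p with
  | [a, b] =>
    if pvAlt (cs.filter (fun c => c == a || c == b)) then
      ((cs.filter (fun c => c == a || c == b)).length : Int)
    else 0
  | _ => 0

def pvVal (r : Char × Char × Option Char × Int × Bool) : Int :=
  if r.2.2.2.2 = true then r.2.2.2.1 else 0

theorem pvAlt_cons_cons (x y : Char) (ys : List Char) :
    pvAlt (x :: y :: ys) = ((x != y) && pvAlt (y :: ys)) := by
  simp [pvAlt]

-- every run length ≤ 1  ↔  no two adjacent characters are equal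
theorem pv_runs_le_one_iff (l : List Char) :
    (∀ g ∈ pvRunsA l, g.length ≤ 1) ↔ pvAlt l = true := by
  induction l using pvRunsA.induct with
  | case1 => simp [pvRunsA, pvAlt]
  | case2 x xs ih =>
    rw [pvRunsA]
    cases xs with
    | nil => simp [pvRunsA, pvAlt]
    | cons y ys =>
      by_cases hyx : (y == x) = true
      · have hy : y = x := by simpa using hyx
        apply iff_of_false
        · intro hall
          have h2 := hall (x :: List.takeWhile (fun z => z == x) (y :: ys)) (by simp)
          rw [List.takeWhile_cons_of_pos (p := fun z => z == x) (a := y) (l := ys) hyx] at h2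
          simp at h2
        · rw [pvAlt_cons_cons]
          simp [hy]
      · have hne : y ≠ x := by simpa using hyx
        rw [List.dropWhile_cons_of_neg (p := fun z => z == x) (a := y) (l := ys) hyx] at ih
        rw [List.takeWhile_cons_of_neg (p := fun z => z == x) (a := y) (l := ys) hyx,
          List.dropWhile_cons_of_neg (p := fun z => z == x) (a := y) (l := ys) hyx,
          pvAlt_cons_cons]
        constructor
        · intro hall
          have h1 := ih.mp (fun g hg => hall g (by simp [hg]))
          simp [h1, bne_iff_ne, hne.symm]
        · intro hr
          have h2 : pvAlt (y :: ys) = true := by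
            cases hA : pvAlt (y :: ys)
            · rw [hA, Bool.and_false] at hr; exact absurd hr (by simp)
            · rfl
          intro g hg
          rcases List.mem_cons.mp hg with rfl | hg'
          · simp
          · exact ih.mpr h2 g hg'

-- A's groupby/max-by-key validity test equals the adjacent-pair test
theorem pv_valid_eq_alt (l : List Char) : valid_list l = pvAlt l := by
  unfold valid_list
  by_cases hone : ∀ g ∈ pvRunsA l, g.length ≤ 1
  · rw [(pv_runs_le_one_iff l).mp hone]
    have hle : (PySem.List.maxD (pvRunsA l) (fun x => x.length) []).length ≤ 1 := by
      cases hr : pvRunsA l with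
      | nil => simp [PySem.List.maxD_nil]
      | cons g gs =>
        rw [hr] at hone
        exact hone _ (PySem.List.maxD_mem (g :: gs) (fun x => x.length) [] (by simp))
    simp only [gt_iff_lt]
    rw [if_neg (by omega)]
  · have halt : pvAlt l = false := by
      cases hA : pvAlt l
      · rfl
      · exact absurd ((pv_runs_le_one_iff l).mpr hA) hone
    rw [halt]
    obtain ⟨g, hg, hlen⟩ : ∃ g ∈ pvRunsA l, 1 < g.length := by
      by_contra hc
      exact hone (fun g hg => by by_contra h2; exact hc ⟨g, hg, by omega⟩)
    have hne : pvRunsA l ≠ [] := by intro h; rw [h] at hg; simp at hg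
    have h2 : g.length ≤ (PySem.List.maxD (pvRunsA l) (fun x => x.length) []).length :=
      PySem.List.le_key_maxD (pvRunsA l) (fun x => x.length) [] hne g hg
    simp only [gt_iff_lt]
    rw [if_pos (by omega)]

-- a running-max loop is foldl max over the mapped values
theorem pv_fold_norm {α : Type} (l : List α) (f : Int → α → Int) (g : α → Int)
    (h : ∀ (m : Int) (x : α), 0 ≤ m → f m x = max m (g x)) :
    ∀ m : Int, 0 ≤ m → l.foldl f m = (l.map g).foldl max m := by
  induction l with
  | nil => intro m _; simp
  | cons x xs ih =>
    intro m hm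
    simp only [List.foldl_cons, List.map_cons]
    rw [h m x hm]
    exact ih _ (le_trans hm (le_max_left _ _))

theorem pv_maxfold_eq (u v : List Int)
    (h1 : ∀ x ∈ u, ∃ y ∈ v, x ≤ y) (h2 : ∀ y ∈ v, ∃ x ∈ u, y ≤ x) :
    u.foldl max 0 = v.foldl max 0 := by
  apply le_antisymm
  · rcases PySem.List.foldl_max_mem u 0 with h | h
    · rw [h]; exact (PySem.List.le_foldl_max v 0).1
    · obtain ⟨y, hy, hxy⟩ := h1 _ h
      exact le_trans hxy ((PySem.List.le_foldl_max v 0).2 y hy)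
  · rcases PySem.List.foldl_max_mem v 0 with h | h
    · rw [h]; exact (PySem.List.le_foldl_max u 0).1
    · obtain ⟨x, hx, hyx⟩ := h2 _ h
      exact le_trans hyx ((PySem.List.le_foldl_max u 0).2 x hx)

theorem pv_filter_contains_eq {c L : List Char} (h : c.Sublist L) :
    L.Nodup → L.filter (fun x => c.contains x) = c := by
  induction h with
  | slnil => intro _; simp
  | @cons c l2 a h ih =>
    intro hnd
    have ha : a ∉ l2 := (List.nodup_cons.mp hnd).1
    have hac : ¬ (c.contains a = true) := by
      rw [List.contains_iff_mem]
      exact fun hm => ha (h.subset hm)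
    rw [List.filter_cons_of_neg (by simpa using hac)]
    exact ih (List.nodup_cons.mp hnd).2
  | @cons₂ c l2 a h ih =>
    intro hnd
    have ha : a ∉ l2 := (List.nodup_cons.mp hnd).1
    rw [List.filter_cons_of_pos (by simp)]
    congr 1
    rw [List.filter_congr (q := fun x => c.contains x)]
    · exact ih (List.nodup_cons.mp hnd).2
    · intro x hx
      have hxa : (x == a) = false := beq_eq_false_iff_ne.mpr (fun he => ha (he ▸ hx))
      rw [List.contains_cons, hxa, Bool.false_or]

theorem pv_length_filter_split {α : Type} (L : List α) (p : α → Bool) :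
    (L.filter p).length + (L.filter (fun x => !(p x))).length = L.length := by
  induction L with
  | nil => simp
  | cons a t ih =>
    by_cases hp : p a = true
    · rw [List.filter_cons_of_pos hp, List.filter_cons_of_neg (by simp [hp])]
      simp only [List.length_cons]; omega
    · rw [List.filter_cons_of_neg hp, List.filter_cons_of_pos (by simp [hp])]
      simp only [List.length_cons]; omega

theorem pv_compl_length {c L : List Char} (h : c.Sublist L) (hnd : L.Nodup) :
    (L.filter (fun x => !(c.contains x))).length = L.length - c.length := by
  have hs := pv_length_filter_split L (fun x => c.contains x)
  rw [pv_filter_contains_eq h hnd] at hs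
  omega

theorem pv_contains_eq_false {c : List Char} {x : Char} (hxc : x ∉ c) :
    c.contains x = false := by
  cases hcx : c.contains x
  · rfl
  · exact absurd (List.contains_iff_mem.mp hcx) hxc

-- A's per-candidate value in terms of the complement pair's membership predicate
theorem pv_gA_eq_gB' (cs comb : List Char) (a b : Char)
    (h : ∀ x ∈ cs, (!(comb.contains x)) = (x == a || x == b)) :
    pvGA cs comb = pvGB cs [a, b] := by
  unfold pvGA pvGB
  rw [List.filter_congr h, pv_valid_eq_alt]

theorem pv_compl_pair_pred (cs L comb : List Char) (hmem : ∀ c ∈ cs, c ∈ L)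
    (a b : Char) (hc : L.filter (fun y => !(comb.contains y)) = [a, b]) :
    ∀ x ∈ cs, (!(comb.contains x)) = (x == a || x == b) := by
  intro x hx
  have hxL := hmem x hx
  by_cases hxc : x ∈ comb
  · have hxab : x ∉ ([a, b] : List Char) := by
      intro hmemab
      rw [← hc] at hmemab
      have h2 := (List.mem_filter.mp hmemab).2
      rw [List.contains_iff_mem.mpr hxc] at h2
      simp at h2
    have e2 : (x == a) = false :=
      beq_eq_false_iff_ne.mpr (fun he => hxab (by rw [he]; simp))
    have e3 : (x == b) = false :=
      beq_eq_false_iff_ne.mpr (fun he => hxab (by rw [he]; simp))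
    rw [List.contains_iff_mem.mpr hxc, e2, e3]
    rfl
  · have hxab : x ∈ ([a, b] : List Char) := by
      rw [← hc, List.mem_filter]
      exact ⟨hxL, by rw [pv_contains_eq_false hxc]; rfl⟩
    rw [pv_contains_eq_false hxc]
    rcases (by simpa using hxab : x = a ∨ x = b) with rfl | rfl
    · simp
    · simp

theorem pv_rec_pred (cs L : List Char) (hmem : ∀ c ∈ cs, c ∈ L) (a b : Char) :
    ∀ x ∈ cs, (!((L.filter (fun y => !(y == a || y == b))).contains x)) = (x == a || x == b) := by
  intro x hx
  by_cases hab : (x == a || x == b) = true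
  · have hnm : x ∉ L.filter (fun y => !(y == a || y == b)) := by
      intro hmemf
      have h2 := (List.mem_filter.mp hmemf).2
      rw [hab] at h2; simp at h2
    rw [hab, pv_contains_eq_false hnm]
    rfl
  · have hm : x ∈ L.filter (fun y => !(y == a || y == b)) := by
      rw [List.mem_filter]
      refine ⟨hmem x hx, ?_⟩
      rw [Bool.eq_false_iff.mpr hab]
      rfl
    rw [List.contains_iff_mem.mpr hm, Bool.eq_false_iff.mpr hab]
    rfl

theorem pv_gB_comm (cs : List Char) (a b : Char) : pvGB cs [a, b] = pvGB cs [b, a] := by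
  have h : (fun c => c == a || c == b) = (fun c => c == b || c == a) :=
    funext (fun c => Bool.or_comm _ _)
  simp only [pvGB, h]

theorem pv_gB_nonneg (cs p : List Char) : 0 ≤ pvGB cs p := by
  unfold pvGB; split
  · split <;> simp
  · simp

-- a nodup list with members exactly {a, b} is [a, b] or [b, a]
theorem pv_pair_eq (q : List Char) (a b : Char) (hnd : q.Nodup) (hab : a ≠ b)
    (hm : ∀ x, x ∈ q ↔ (x = a ∨ x = b)) : q = [a, b] ∨ q = [b, a] := by
  match q with
  | [] => simpa using (hm a).mpr (Or.inl rfl)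
  | [x] =>
    have h1 : a = x := by simpa using (hm a).mpr (Or.inl rfl)
    have h2 : b = x := by simpa using (hm b).mpr (Or.inr rfl)
    exact absurd (h1.trans h2.symm) hab
  | x :: y :: rest =>
    have hx : x = a ∨ x = b := (hm x).mp (by simp)
    have hy : y = a ∨ y = b := (hm y).mp (by simp)
    have hxy : x ≠ y := fun he => (List.nodup_cons.mp hnd).1 (he ▸ List.mem_cons_self)
    have hrest : rest = [] := by
      cases rest with
      | nil => rfl
      | cons z zs =>
        exfalso
        have hz : z = a ∨ z = b := (hm z).mp (by simp)
        have hzx : z ≠ x := fun he => (List.nodup_cons.mp hnd).1 (by simp [he.symm])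
        have hzy : z ≠ y :=
          fun he => (List.nodup_cons.mp (List.nodup_cons.mp hnd).2).1 (by simp [he.symm])
        rcases hx with rfl | rfl <;> rcases hy with hy | hy <;> rcases hz with hz | hz <;>
          simp_all
    subst hrest
    rcases hx with rfl | rfl
    · rcases hy with hy | rfl
      · exact absurd hy.symm (by simpa using hxy)
      · exact Or.inl rfl
    · rcases hy with rfl | hy
      · exact Or.inr rfl
      · exact absurd hy.symm (by simpa using hxy)

theorem pv_filter_pair (L : List Char) (hnd : L.Nodup) (a b : Char)
    (ha : a ∈ L) (hb : b ∈ L) (hab : a ≠ b) :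
    L.filter (fun x => x == a || x == b) = [a, b] ∨
      L.filter (fun x => x == a || x == b) = [b, a] := by
  apply pv_pair_eq _ a b (hnd.filter _) hab
  intro x
  rw [List.mem_filter]
  constructor
  · rintro ⟨-, hp⟩
    simpa using hp
  · rintro (rfl | rfl)
    · exact ⟨ha, by simp⟩
    · exact ⟨hb, by simp⟩

-- ===== B-side loop characterization =====

theorem pv_foldl_map {α β : Type} (cs : List α) (g : β → α → β) (st0 : List β) :
    cs.foldl (fun st c => st.map (fun r => g r c)) st0
      = st0.map (fun r => cs.foldl g r) := by
  induction cs generalizing st0 with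
  | nil => simp
  | cons c cs ih =>
    simp only [List.foldl_cons]
    rw [ih, List.map_map]
    rfl

theorem pv_fold_step1 (a b : Char) (cs : List Char) (q : Option Char × Int × Bool) :
    cs.foldl pvStep1 (a, b, q) = (a, b, cs.foldl (fun q c => pvUpd a b c q) q) := by
  induction cs generalizing q with
  | nil => rfl
  | cons c cs ih =>
    simp only [List.foldl_cons]
    exact ih _

theorem pv_fold_upd_filter (a b : Char) (cs : List Char) (q : Option Char × Int × Bool) :
    cs.foldl (fun q c => pvUpd a b c q) q
      = (cs.filter (fun c => c == a || c == b)).foldl (fun q c => pvUpd a b c q) q := by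
  induction cs generalizing q with
  | nil => simp
  | cons c cs ih =>
    cases h : (c == a || c == b) with
    | true =>
      simp only [List.filter_cons, h, if_pos, List.foldl_cons]
      exact ih _
    | false =>
      simp only [List.filter_cons, h, Bool.false_eq_true, if_false, List.foldl_cons]
      rw [show pvUpd a b c q = q by unfold pvUpd; rw [if_neg (by simp [h])]]
      exact ih q

def pvGood (last : Option Char) (t : List Char) : Bool :=
  match t with
  | [] => true
  | x :: xs => (some x != last) && pvGood (some x) xs

theorem pv_fold_upd_char (a b : Char) (t : List Char)
    (ht : ∀ c ∈ t, (c == a || c == b) = true) (last : Option Char) (cnt : Int) (ok : Bool) :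
    ((t.foldl (fun q c => pvUpd a b c q) (last, cnt, ok)).2.2 = (ok && pvGood last t))
    ∧ (pvGood last t = true →
        (t.foldl (fun q c => pvUpd a b c q) (last, cnt, ok)).2.1 = cnt + (t.length : Int)) := by
  induction t generalizing last cnt ok with
  | nil => simp [pvGood]
  | cons x xs ih =>
    have hx := ht x (by simp)
    have hrest : ∀ c ∈ xs, (c == a || c == b) = true := fun c hc => ht c (by simp [hc])
    simp only [List.foldl_cons]
    by_cases hl : (last == some x) = true
    · have hupd : pvUpd a b x (last, cnt, ok) = (last, cnt, false) := by
        unfold pvUpd; rw [if_pos hx, if_pos (by simpa using hl)]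
      rw [hupd]
      have hgood : pvGood last (x :: xs) = false := by
        rw [pvGood]
        have : (some x != last) = false := by
          simp at hl ⊢; exact hl.symm
        rw [this, Bool.false_and]
      rw [hgood]
      obtain ⟨hok, -⟩ := ih hrest last cnt false
      constructor
      · rw [hok]; simp
      · intro h; simp at h
    · have hupd : pvUpd a b x (last, cnt, ok) = (some x, cnt + 1, ok) := by
        unfold pvUpd; rw [if_pos hx, if_neg (by simpa using hl)]
      rw [hupd]
      have hgood : pvGood last (x :: xs) = pvGood (some x) xs := by
        rw [pvGood]
        have : (some x != last) = true := by
          simp at hl ⊢; exact fun he => hl he.symm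
        rw [this, Bool.true_and]
      rw [hgood]
      obtain ⟨hok, hcnt⟩ := ih hrest (some x) (cnt + 1) ok
      refine ⟨hok, fun h => ?_⟩
      rw [hcnt h]
      simp only [List.length_cons]
      push_cast
      ring

theorem pv_good_some (x : Char) (xs : List Char) : pvGood (some x) xs = pvAlt (x :: xs) := by
  induction xs generalizing x with
  | nil => simp [pvGood, pvAlt]
  | cons y ys ih =>
    rw [pvGood, ih y, pvAlt_cons_cons]
    have : (some y != some x) = (x != y) := by
      simp [bne, BEq.comm (a := y) (b := x)]
    rw [this]

theorem pv_good_none (t : List Char) : pvGood none t = pvAlt t := by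
  cases t with
  | nil => simp [pvGood, pvAlt]
  | cons x xs =>
    rw [pvGood, ← pv_good_some x xs]
    simp

theorem pvVal_mk (a b : Char) (q : Option Char × Int × Bool) :
    pvVal (a, b, q) = if q.2.2 = true then q.2.1 else 0 := rfl

-- per-record final value
theorem pv_val_eq_gB (cs : List Char) (a b : Char) :
    pvVal (cs.foldl pvStep1 (a, b, none, 0, true)) = pvGB cs [a, b] := by
  rw [pv_fold_step1, pv_fold_upd_filter]
  have ht : ∀ c ∈ cs.filter (fun c => c == a || c == b), (c == a || c == b) = true :=
    fun c hc => by simpa using (List.mem_filter.mp hc).2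
  obtain ⟨hok, hcnt⟩ :=
    pv_fold_upd_char a b (cs.filter (fun c => c == a || c == b)) ht none 0 true
  rw [Bool.true_and, pv_good_none] at hok
  rw [pv_good_none] at hcnt
  rw [pvVal_mk, hok]
  by_cases hA : pvAlt (cs.filter (fun c => c == a || c == b)) = true
  · rw [if_pos hA, hcnt hA]
    simp only [pvGB]
    rw [if_pos hA]
    simp
  · rw [if_neg hA]
    simp only [pvGB]
    rw [if_neg hA]

-- init-state membership characterization
theorem pv_mem_init (chars : List Char) (hso : chars.Pairwise (· < ·)) :
    ∀ r ∈ pvInitState chars,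
      ∃ a b, r = (a, b, none, 0, true) ∧ a ∈ chars ∧ b ∈ chars ∧ a < b := by
  intro r hr
  unfold pvInitState at hr
  obtain ⟨ia, hia, hr2⟩ := List.mem_flatMap.mp hr
  obtain ⟨k, hk, rfl⟩ := (PySem.List.mem_enumerate_iff _ _ _).mp hia
  obtain ⟨b, hbmem, rfl⟩ := List.mem_map.mp hr2
  rw [show ((0 : Int) + (k : Int) + 1) = ((k + 1 : Nat) : Int) by push_cast; ring,
    PySem.List.slice_from_natCast] at hbmem
  have hbc : b ∈ chars := List.mem_of_mem_drop hbmem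
  obtain ⟨i, hi, hbi⟩ := List.mem_iff_getElem.mp hbmem
  rw [List.getElem_drop] at hbi
  have hilen : k + 1 + i < chars.length := by
    rw [List.length_drop] at hi; omega
  refine ⟨chars[k], b, rfl, List.getElem_mem hk, hbc, ?_⟩
  rw [← hbi]
  exact List.pairwise_iff_getElem.mp hso k (k + 1 + i) hk hilen (by omega)

theorem pv_init_mem (chars : List Char) (hso : chars.Pairwise (· < ·)) (a b : Char)
    (ha : a ∈ chars) (hb : b ∈ chars) (hab : a < b) :
    (a, b, none, 0, true) ∈ pvInitState chars := by
  obtain ⟨i, hi, rfl⟩ := List.mem_iff_getElem.mp ha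
  obtain ⟨j, hj, rfl⟩ := List.mem_iff_getElem.mp hb
  have hij : i < j := by
    rcases lt_trichotomy i j with h | h | h
    · exact h
    · subst h; exact absurd hab (lt_irrefl _)
    · exact absurd (List.pairwise_iff_getElem.mp hso j i hj hi h) (lt_asymm hab)
  unfold pvInitState
  apply List.mem_flatMap.mpr
  refine ⟨((0 : Int) + (i : Int), chars[i]), ?_, ?_⟩
  · exact (PySem.List.mem_enumerate_iff _ _ _).mpr ⟨i, hi, rfl⟩
  · apply List.mem_map.mpr
    refine ⟨chars[j], ?_, rfl⟩
    rw [show ((0 : Int) + (i : Int) + 1) = ((i + 1 : Nat) : Int) by push_cast; ring,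
      PySem.List.slice_from_natCast]
    have hlt : j - (i + 1) < (chars.drop (i + 1)).length := by
      rw [List.length_drop]; omega
    have : (chars.drop (i + 1))[j - (i + 1)]'hlt = chars[j] := by
      rw [List.getElem_drop]
      congr 1
      omega
    rw [← this]
    exact List.getElem_mem hlt

theorem pv_init_short (chars : List Char) (h : chars.length < 2) : pvInitState chars = [] := by
  match chars, h with
  | [], _ => rfl
  | [x], _ => rfl

theorem pv_init_pair (a b : Char) : pvInitState [a, b] = [(a, b, none, 0, true)] := by
  rfl

theorem pv_main (s : String) : get_max_tstring_len s = get_max_tstring_len_alt s := by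
  unfold get_max_tstring_len get_max_tstring_len_alt
  have hnd : (PySem.Set.ofList s.toList).Nodup := PySem.Set.nodup_ofList s.toList
  have hmem : ∀ c ∈ s.toList, c ∈ PySem.Set.ofList s.toList :=
    fun c hc => (PySem.Set.mem_ofList s.toList c).mpr hc
  have hso : (PySem.List.sorted (PySem.Set.ofList s.toList) (fun x => x) false).Pairwise (· < ·) :=
    PySem.List.sorted_ofList_pairwise_lt s.toList
  have hmemc : ∀ x : Char,
      x ∈ PySem.List.sorted (PySem.Set.ofList s.toList) (fun x => x) false
        ↔ x ∈ PySem.Set.ofList s.toList :=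
    fun x => PySem.List.mem_sorted _ _ _ x
  have hlenc : (PySem.List.sorted (PySem.Set.ofList s.toList) (fun x => x) false).length
      = (PySem.Set.ofList s.toList).length := PySem.List.length_sorted _ _ _
  set cs := s.toList with hcs
  set L := PySem.Set.ofList cs with hL
  set chars := PySem.List.sorted L (fun x => x) false with hchars
  dsimp only
  rw [pv_foldl_map]
  have hstepB : ∀ (m : Int) (r : Char × Char × Option Char × Int × Bool), 0 ≤ m →
      (if r.2.2.2.2 = true ∧ r.2.2.2.1 > m then r.2.2.2.1 else m) = max m (pvVal r) := by
    intro m r hm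
    unfold pvVal
    cases hok : r.2.2.2.2 with
    | false =>
      rw [if_neg (by simp), if_neg (by simp)]
      exact (max_eq_left hm).symm
    | true =>
      rw [if_pos rfl]
      by_cases hgt : r.2.2.2.1 > m
      · rw [if_pos ⟨rfl, hgt⟩]
        exact (max_eq_right (le_of_lt hgt)).symm
      · rw [if_neg (fun h => hgt h.2)]
        exact (max_eq_left (not_lt.mp hgt)).symm
  by_cases hk2 : L.length < 2
  · rw [if_pos hk2, pv_init_short chars (by omega)]
    simp
  · rw [if_neg hk2]
    by_cases hke : L.length = 2
    · rw [if_pos (by simpa using hke)]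
      obtain ⟨a, b, hab2⟩ := List.length_eq_two.mp (hlenc.trans hke)
      rw [hab2, pv_init_pair]
      simp only [List.map_cons, List.map_nil, List.foldl_cons, List.foldl_nil]
      rw [hstepB 0 _ le_rfl, pv_val_eq_gB, max_eq_right (pv_gB_nonneg cs [a, b])]
      have hfull : cs.filter (fun c => c == a || c == b) = cs := by
        apply List.filter_eq_self.mpr
        intro x hx
        have hxc : x ∈ chars := (hmemc x).mpr (hmem x hx)
        rw [hab2] at hxc
        rcases (by simpa using hxc : x = a ∨ x = b) with rfl | rfl <;> simp
      simp only [pvGB]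
      rw [hfull, pv_valid_eq_alt]
    · rw [if_neg (by simpa using hke)]
      refine Eq.trans
        (pv_fold_norm (PySem.List.combinations L (L.length - 2)) _ (pvGA cs) ?_ 0 le_rfl)
        (Eq.trans ?_
          (pv_fold_norm ((pvInitState chars).map (fun r => cs.foldl pvStep1 r)) _ pvVal
            hstepB 0 le_rfl).symm)
      · intro m comb hm
        dsimp only
        unfold pvGA
        split
        · rw [max_def]
          split_ifs <;> omega
        · exact (max_eq_left hm).symm
      · rw [List.map_map]
        apply pv_maxfold_eq
        · intro x hx
          obtain ⟨comb, hcmem, rfl⟩ := List.mem_map.mp hx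
          obtain ⟨hsub, hlenb⟩ :=
            (PySem.List.mem_combinations_iff L (L.length - 2) comb).mp hcmem
          have hplen : (L.filter (fun y => !(comb.contains y))).length = 2 := by
            rw [pv_compl_length hsub hnd, hlenb]; omega
          obtain ⟨a, b, hp⟩ := List.length_eq_two.mp hplen
          have hpnd : (L.filter (fun y => !(comb.contains y))).Nodup := hnd.filter _
          have hab : a ≠ b := by
            rw [hp] at hpnd
            simpa using (List.nodup_cons.mp hpnd).1
          have haL : a ∈ L := by
            have h1 : a ∈ L.filter (fun y => !(comb.contains y)) := by rw [hp]; simp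
            exact (List.mem_filter.mp h1).1
          have hbL : b ∈ L := by
            have h1 : b ∈ L.filter (fun y => !(comb.contains y)) := by rw [hp]; simp
            exact (List.mem_filter.mp h1).1
          have hval : pvGA cs comb = pvGB cs [a, b] :=
            pv_gA_eq_gB' cs comb a b (pv_compl_pair_pred cs L comb hmem a b hp)
          rcases lt_trichotomy a b with hor | hor | hor
          · refine ⟨_, List.mem_map.mpr ⟨(a, b, none, 0, true),
              pv_init_mem chars hso a b ((hmemc a).mpr haL) ((hmemc b).mpr hbL) hor, rfl⟩, ?_⟩
            simp only [Function.comp_apply]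
            exact le_of_eq (hval.trans (pv_val_eq_gB cs a b).symm)
          · exact absurd hor hab
          · refine ⟨_, List.mem_map.mpr ⟨(b, a, none, 0, true),
              pv_init_mem chars hso b a ((hmemc b).mpr hbL) ((hmemc a).mpr haL) hor, rfl⟩, ?_⟩
            simp only [Function.comp_apply]
            exact le_of_eq ((hval.trans (pv_gB_comm cs a b)).trans (pv_val_eq_gB cs b a).symm)
        · intro y hy
          obtain ⟨r, hrmem, rfl⟩ := List.mem_map.mp hy
          obtain ⟨a, b, rfl, hac, hbc, hab⟩ := pv_mem_init chars hso r hrmem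
          have haL : a ∈ L := (hmemc a).mp hac
          have hbL : b ∈ L := (hmemc b).mp hbc
          have habne : a ≠ b := ne_of_lt hab
          have h2 : (L.filter (fun x => x == a || x == b)).length = 2 := by
            rcases pv_filter_pair L hnd a b haL hbL habne with h | h <;> rw [h] <;> rfl
          have hclen : (L.filter (fun y => !(y == a || y == b))).length = L.length - 2 := by
            have hsplit := pv_length_filter_split L (fun x => x == a || x == b)
            omega
          refine ⟨pvGA cs (L.filter (fun y => !(y == a || y == b))),
            List.mem_map.mpr ⟨_, (PySem.List.mem_combinations_iff _ _ _).mpr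
              ⟨List.filter_sublist, hclen⟩, rfl⟩, ?_⟩
          have hval := pv_gA_eq_gB' cs (L.filter (fun y => !(y == a || y == b))) a b
            (pv_rec_pred cs L hmem a b)
          simp only [Function.comp_apply]
          exact le_of_eq ((pv_val_eq_gB cs a b).trans hval.symm)

-- ===== VERDICT (by name: the statement is the Claim_ definition above) =====
theorem get_max_tstring_len_spec : Claim_equal_get_max_tstring_len := by
  intro s _
  unfold Spec_get_max_tstring_len
  exact pv_main s
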